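-- pv_equiv track=rewrite | github.com/LuukHAN/AdventOfCode | 2024/Dag_3/Dag3p2v1.py | find_correct_muls
-- ===== SOURCE A (Python) =====
-- def find_correct_muls(found_strings):
--     doing = True
--     correct_muls = []
--     for found_string in found_strings:
--         if found_string == "don't()":
--             doing = False
--         elif found_string == "do()":
--             doing = True
--         else:
--             if doing:
--                 correct_muls.append(found_string)
--     return correct_muls
-- ===== SOURCE B (Python) =====
-- def find_correct_muls(found_strings):
--     # Pass 1: per-element toggle state (state after seeing the element, seeded True).
--     flags = []
--     state = True
--     for s in found_strings:
--         if s == "don't()":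
--             state = False
--         elif s == "do()":
--             state = True
--         flags.append(state)
--     # Pass 2: keep non-marker elements whose aligned flag is True.
--     return [s for s, f in zip(found_strings, flags)
--             if f and s != "do()" and s != "don't()"]
-- ===== Notes on version B (the rewrite author's own statement) =====
-- stated objective: alternative
-- what changed: Replaces A's single interleaved state-update-and-append loop by two passes: first a prefix scan computing the per-element do/don't flag, then a zip-comprehension filter keeping non-marker elements whose flag is True.
import Mathlib
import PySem

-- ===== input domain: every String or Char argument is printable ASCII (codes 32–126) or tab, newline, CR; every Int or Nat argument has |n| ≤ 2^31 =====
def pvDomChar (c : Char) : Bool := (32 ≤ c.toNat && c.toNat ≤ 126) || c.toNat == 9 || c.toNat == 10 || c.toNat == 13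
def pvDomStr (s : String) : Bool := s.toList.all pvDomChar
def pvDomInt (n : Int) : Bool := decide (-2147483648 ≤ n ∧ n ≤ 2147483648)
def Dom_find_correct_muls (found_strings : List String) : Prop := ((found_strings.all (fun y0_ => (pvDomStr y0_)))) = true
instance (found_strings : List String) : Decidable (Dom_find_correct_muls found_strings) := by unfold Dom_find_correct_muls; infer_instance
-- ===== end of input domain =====

-- B splits A's interleaved state-and-append loop into a prefix-scan pass computing flags plus a zip-filter pass; same O(n) cost, different decomposition.


-- ===== PORT A =====
-- one loop: (doing, correct_muls) state, append when doing and not a marker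
def find_correct_muls (found_strings : List String) : List String :=
  (found_strings.foldl (fun (st : Bool × List String) found_string =>
      if found_string == "don't()" then (false, st.2)
      else if found_string == "do()" then (true, st.2)
      else if st.1 then (st.1, st.2 ++ [found_string]) else st)
    (true, [])).2

-- ===== PORT B =====
-- pass 1: prefix scan of the toggle state, one flag per element
def fcmFlags (found_strings : List String) : List Bool :=
  (found_strings.foldl (fun (p : Bool × List Bool) s =>
      let state := if s == "don't()" then false
                   else if s == "do()" then true
                   else p.1
      (state, p.2 ++ [state]))
    (true, [])).2

-- pass 2: zip-filter comprehension
def find_correct_muls_alt (found_strings : List String) : List String :=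
  (found_strings.zip (fcmFlags found_strings)).filterMap
    (fun sf => if sf.2 && sf.1 != "do()" && sf.1 != "don't()" then some sf.1 else none)

-- ===== PRECONDITION & SPEC =====
def Spec_find_correct_muls (found_strings : List String) (out : List String) : Prop := out = find_correct_muls_alt found_strings
instance (found_strings : List String) (out : List String) : Decidable (Spec_find_correct_muls found_strings out) := by unfold Spec_find_correct_muls; infer_instance

-- ===== CLAIM (what is proved, stated in full; the proofs are below) =====
def Claim_equal_find_correct_muls : Prop := ∀ (found_strings : List String), Dom_find_correct_muls found_strings → Spec_find_correct_muls found_strings (find_correct_muls found_strings)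

-- ===== LEMMAS AND PROOFS =====

-- reference recursion: what A's loop produces from state st
def fcmRef (st : Bool) : List String → List String
  | [] => []
  | x :: xs =>
      if x == "don't()" then fcmRef false xs
      else if x == "do()" then fcmRef true xs
      else if st then x :: fcmRef st xs else fcmRef st xs

-- flags as a plain scan from state st
def fcmFlagsRef (st : Bool) : List String → List Bool
  | [] => []
  | x :: xs =>
      let st' := if x == "don't()" then false else if x == "do()" then true else st
      st' :: fcmFlagsRef st' xs

theorem fcmA_go (xs : List String) : ∀ (st : Bool) (acc : List String),
    (xs.foldl (fun (p : Bool × List String) found_string =>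
        if found_string == "don't()" then (false, p.2)
        else if found_string == "do()" then (true, p.2)
        else if p.1 then (p.1, p.2 ++ [found_string]) else p)
      (st, acc)).2 = acc ++ fcmRef st xs := by
  induction xs with
  | nil => intro st acc; simp [fcmRef]
  | cons x xs ih =>
      intro st acc
      simp only [List.foldl_cons]
      by_cases h1 : x == "don't()"
      · rw [if_pos h1, show fcmRef st (x :: xs) = fcmRef false xs from by
          rw [eq_of_beq h1]; simp [fcmRef]]
        exact ih false acc
      · by_cases h2 : x == "do()"
        · rw [if_neg h1, if_pos h2, show fcmRef st (x :: xs) = fcmRef true xs from by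
            rw [eq_of_beq h2]; simp [fcmRef]]
          exact ih true acc
        · have hr : fcmRef st (x :: xs)
              = if st then x :: fcmRef st xs else fcmRef st xs := by
            rw [fcmRef, if_neg h1, if_neg h2]
          rw [if_neg h1, if_neg h2, hr]
          cases st with
          | false => rw [if_neg (by decide), if_neg (by decide)]; exact ih false acc
          | true =>
              rw [if_pos rfl, if_pos rfl, ih true (acc ++ [x]), List.append_assoc,
                  List.singleton_append]

theorem fcmFlags_go (xs : List String) : ∀ (st : Bool) (acc : List Bool),
    (xs.foldl (fun (p : Bool × List Bool) s =>
        let state := if s == "don't()" then false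
                     else if s == "do()" then true
                     else p.1
        (state, p.2 ++ [state]))
      (st, acc)).2 = acc ++ fcmFlagsRef st xs := by
  induction xs with
  | nil => intro st acc; simp [fcmFlagsRef]
  | cons x xs ih =>
      intro st acc
      simp only [List.foldl_cons]
      rw [show fcmFlagsRef st (x :: xs)
            = (if x == "don't()" then false else if x == "do()" then true else st)
              :: fcmFlagsRef
                 (if x == "don't()" then false else if x == "do()" then true else st) xs
          from rfl]
      rw [ih, List.append_assoc, List.singleton_append]

theorem fcm_zip_filter (xs : List String) : ∀ (st : Bool),
    (xs.zip (fcmFlagsRef st xs)).filterMap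
      (fun sf => if sf.2 && sf.1 != "do()" && sf.1 != "don't()" then some sf.1 else none)
    = fcmRef st xs := by
  induction xs with
  | nil => intro st; rfl
  | cons x xs ih =>
      intro st
      by_cases h1 : x = "don't()"
      · subst h1
        show (((("don't()" : String), false) :: xs.zip (fcmFlagsRef false xs)).filterMap _) = _
        rw [List.filterMap_cons_none (by decide),
            show fcmRef st ("don't()" :: xs) = fcmRef false xs from rfl]
        exact ih false
      · by_cases h2 : x = "do()"
        · subst h2
          show (((("do()" : String), true) :: xs.zip (fcmFlagsRef true xs)).filterMap _) = _
          rw [List.filterMap_cons_none (by decide),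
              show fcmRef st ("do()" :: xs) = fcmRef true xs from rfl]
          exact ih true
        · have hb1 : (x == "don't()") = false := beq_eq_false_iff_ne.mpr h1
          have hb2 : (x == "do()") = false := beq_eq_false_iff_ne.mpr h2
          have hf : fcmFlagsRef st (x :: xs) = st :: fcmFlagsRef st xs := by
            simp [fcmFlagsRef, hb1, hb2]
          rw [hf, List.zip_cons_cons]
          cases st with
          | false =>
              have hr : fcmRef false (x :: xs) = fcmRef false xs := by
                simp [fcmRef, hb1, hb2]
              rw [List.filterMap_cons_none (by simp), hr]
              exact ih false
          | true =>
              have hr : fcmRef true (x :: xs) = x :: fcmRef true xs := by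
                simp [fcmRef, hb1, hb2]
              rw [List.filterMap_cons_some (b := x) (by simp [bne, hb1, hb2]), hr]
              exact (congrArg (x :: ·) (ih true))

-- ===== VERDICT (by name: the statement is the Claim_ definition above) =====
theorem find_correct_muls_spec : Claim_equal_find_correct_muls := by
  intro found_strings _
  show find_correct_muls found_strings = find_correct_muls_alt found_strings
  rw [find_correct_muls, find_correct_muls_alt, fcmFlags, fcmA_go, fcmFlags_go]
  simp only [List.nil_append]
  exact (fcm_zip_filter found_strings true).symm
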